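-- pv_equiv track=rewrite | github.com/oracle/macaron | src/macaron/slsa_analyzer/package_registry/maven_central_registry.py | same_organization
-- ===== SOURCE A (Python) =====
-- RECOGNIZED_CODE_HOSTING_SERVICES = [
--     "github",
--     "gitlab",
--     "bitbucket",
--     "gitee",
-- ]
--
-- def same_organization(group_id_1: str, group_id_2: str) -> bool:
--     """Check if two maven group ids are from the same organization.
--
--     Note: It is assumed that for recognized source platforms, the top level domain doesn't change the organization.
--     I.e., io.github.foo and com.github.foo are assumed to be from the same organization.
--
--     Parameters
--     ----------
--     group_id_1 : str
--         The first group id.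
--     group_id_2 : str
--         The second group id.
--
--     Returns
--     -------
--     bool
--         ``True`` if the two group ids are from the same organization, ``False`` otherwise.
--     """
--     if group_id_1 == group_id_2:
--         return True
--
--     group_id_1_parts = group_id_1.split(".")
--     group_id_2_parts = group_id_2.split(".")
--     if min(len(group_id_1_parts), len(group_id_2_parts)) < 2:
--         return False
--
--     # For groups ids that are under recognized maven namespaces, we only compare the first 3 parts.
--     # For example, io.github.foo.bar and io.github.foo are from the same organization (foo).
--     # Also, io.github.foo and com.github.foo are from the same organization.
--     if (
--         group_id_1_parts[0] in {"io", "com"}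
--         and group_id_1_parts[1] in RECOGNIZED_CODE_HOSTING_SERVICES
--         and group_id_2_parts[0] in {"io", "com"}
--         and group_id_2_parts[1] in RECOGNIZED_CODE_HOSTING_SERVICES
--     ):
--         if len(group_id_1_parts) >= 3 and len(group_id_2_parts) >= 3:
--             return group_id_1_parts[2] == group_id_2_parts[2]
--         return False
--
--     return all(group_id_1_parts[index] == group_id_2_parts[index] for index in range(2))
-- ===== SOURCE B (Python) =====
-- RECOGNIZED_CODE_HOSTING_SERVICES = [
--     "github",
--     "gitlab",
--     "bitbucket",
--     "gitee",
-- ]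
--
--
-- def _org_key(group_id, parts):
--     """Canonical organization key for a group id.
--
--     Recognized hosting namespaces with an organization part map to ("R", org);
--     recognized namespaces without one map to a key unique to the full id, so
--     they never match another id; everything else maps to its first two parts.
--     """
--     if parts[0] in ("io", "com") and parts[1] in RECOGNIZED_CODE_HOSTING_SERVICES:
--         if len(parts) >= 3:
--             return ("R", parts[2])
--         return ("S", group_id)
--     return ("N", parts[0], parts[1])
--
--
-- def same_organization(group_id_1: str, group_id_2: str) -> bool:
--     if group_id_1 == group_id_2:
--         return True
--     parts_1 = group_id_1.split(".")
--     parts_2 = group_id_2.split(".")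
--     if len(parts_1) < 2 or len(parts_2) < 2:
--         return False
--     return _org_key(group_id_1, parts_1) == _org_key(group_id_2, parts_2)
-- ===== Notes on version B (the rewrite author's own statement) =====
-- stated objective: alternative
-- what changed: Replaces the joint four-way conditional over both ids with per-id canonicalization: each id is mapped independently to an organization key and the result is a single key equality.
import Mathlib
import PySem

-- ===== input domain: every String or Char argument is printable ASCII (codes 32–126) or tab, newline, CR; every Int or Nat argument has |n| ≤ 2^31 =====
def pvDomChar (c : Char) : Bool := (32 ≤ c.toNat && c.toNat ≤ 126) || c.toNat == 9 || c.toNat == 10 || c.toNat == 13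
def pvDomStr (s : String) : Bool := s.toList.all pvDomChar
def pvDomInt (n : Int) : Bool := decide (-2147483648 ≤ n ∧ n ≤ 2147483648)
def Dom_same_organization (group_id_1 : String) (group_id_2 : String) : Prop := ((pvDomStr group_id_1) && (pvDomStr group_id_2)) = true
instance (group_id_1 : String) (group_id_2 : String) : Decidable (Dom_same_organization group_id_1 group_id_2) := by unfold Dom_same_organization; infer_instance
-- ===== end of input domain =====

-- B replaces A's joint four-way conditional over both ids by an independent per-id
-- canonical organization key plus one equality compare (objective: alternative decomposition).

-- ===== PORT A =====
def pvHostingA : List String := ["github", "gitlab", "bitbucket", "gitee"]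

def same_organization (group_id_1 : String) (group_id_2 : String) : Bool :=
  if group_id_1 == group_id_2 then true
  else
    let p1 := (PySem.Str.split? group_id_1 ".").getD []  -- sep "." ≠ "": split? is always some here
    let p2 := (PySem.Str.split? group_id_2 ".").getD []  -- sep "." ≠ "": split? is always some here
    if min p1.length p2.length < 2 then false
    else
      match p1, p2 with
      | a1 :: b1 :: r1, a2 :: b2 :: r2 =>
        if (a1 == "io" || a1 == "com") && pvHostingA.contains b1
            && ((a2 == "io" || a2 == "com") && pvHostingA.contains b2) then
          -- if len(p1) >= 3 and len(p2) >= 3: return p1[2] == p2[2]; return False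
          match r1, r2 with
          | x1 :: _, x2 :: _ => x1 == x2
          | _, _ => false
        else
          -- all(p1[index] == p2[index] for index in range(2))
          a1 == a2 && b1 == b2
      | _, _ => false   -- unreachable: both lists have length ≥ 2 here

-- ===== PORT B =====
def pvHostingB : List String := ["github", "gitlab", "bitbucket", "gitee"]

-- _org_key: tuples ("R", x) / ("S", gid) / ("N", a, b) are ported as tagged lists;
-- parts[0]/parts[1]/parts[2] via pyGet? (the .getD "" defaults are unreachable: callers
-- guarantee length ≥ 2 and the 3 ≤ length test guards parts[2])
def pvOrgKey (group_id : String) (parts : List String) : List String :=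
  let a := (PySem.List.pyGet? parts 0).getD ""
  let b := (PySem.List.pyGet? parts 1).getD ""
  if (a == "io" || a == "com") && pvHostingB.contains b then
    if 3 ≤ parts.length then ["R", (PySem.List.pyGet? parts 2).getD ""]
    else ["S", group_id]
  else ["N", a, b]

def same_organization_alt (group_id_1 : String) (group_id_2 : String) : Bool :=
  if group_id_1 == group_id_2 then true
  else
    let p1 := (PySem.Str.split? group_id_1 ".").getD []  -- sep "." ≠ "": split? is always some here
    let p2 := (PySem.Str.split? group_id_2 ".").getD []  -- sep "." ≠ "": split? is always some here
    if p1.length < 2 || p2.length < 2 then false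
    else pvOrgKey group_id_1 p1 == pvOrgKey group_id_2 p2

-- ===== PRECONDITION & SPEC =====
def Spec_same_organization (group_id_1 : String) (group_id_2 : String) (out : Bool) : Prop := out = same_organization_alt group_id_1 group_id_2
instance (group_id_1 : String) (group_id_2 : String) (out : Bool) : Decidable (Spec_same_organization group_id_1 group_id_2 out) := by unfold Spec_same_organization; infer_instance

-- ===== CLAIM (what is proved, stated in full; the proofs are below) =====
def Claim_equal_same_organization : Prop := ∀ (group_id_1 : String) (group_id_2 : String), Dom_same_organization group_id_1 group_id_2 → Spec_same_organization group_id_1 group_id_2 (same_organization group_id_1 group_id_2)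

-- ===== LEMMAS AND PROOFS =====

theorem pvHB_eq : pvHostingB = pvHostingA := rfl

theorem pvOrgKey_cons (g a b : String) (r : List String) :
    pvOrgKey g (a :: b :: r) =
      if (a == "io" || a == "com") && pvHostingA.contains b then
        (match r with
         | x :: _ => ["R", x]
         | [] => ["S", g])
      else ["N", a, b] := by
  have h1 : (PySem.List.pyGet? (a :: b :: r) 1).getD "" = b := by
    rw [show (1:Int) = ((1:Nat):Int) from rfl, PySem.List.pyGet?_natCast]; simp
  cases r with
  | nil => simp [pvOrgKey, pvHB_eq]
  | cons x t =>
    have h2 : (PySem.List.pyGet? (a :: b :: x :: t) 2).getD "" = x := by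
      rw [show (2:Int) = ((2:Nat):Int) from rfl, PySem.List.pyGet?_natCast]; simp
    simp [pvOrgKey, pvHB_eq, h1, h2]

-- Core fact: for distinct ids whose part lists both have length ≥ 2,
-- A's joint conditional equals B's key comparison.
theorem pv_core (g1 g2 : String) (hne : g1 ≠ g2)
    (a1 b1 a2 b2 : String) (r1 r2 : List String) :
    (if (a1 == "io" || a1 == "com") && pvHostingA.contains b1
        && ((a2 == "io" || a2 == "com") && pvHostingA.contains b2) then
        (match r1, r2 with
         | x1 :: _, x2 :: _ => x1 == x2
         | _, _ => false)
      else a1 == a2 && b1 == b2)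
      = (pvOrgKey g1 (a1 :: b1 :: r1) == pvOrgKey g2 (a2 :: b2 :: r2)) := by
  by_cases h1 : ((a1 == "io" || a1 == "com") && pvHostingA.contains b1) = true
  · by_cases h2 : ((a2 == "io" || a2 == "com") && pvHostingA.contains b2) = true
    · simp only [pvOrgKey_cons, h1, h2, Bool.true_and, if_true]
      cases r1 with
      | nil =>
        cases r2 with
        | nil => simp [hne]  -- both 2-part recognized: ["S",g1] == ["S",g2] iff g1 = g2
        | cons x2 t2 => simp
      | cons x1 t1 =>
        cases r2 with
        | nil => simp
        | cons x2 t2 => simp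
    · simp only [pvOrgKey_cons, h1, h2, Bool.and_false, if_true]
      rw [if_neg (by simp)]
      -- key1 starts with "R"/"S", key2 with "N": unequal; and a1=a2 ∧ b1=b2 is impossible
      have hne2 : ¬ (a1 = a2 ∧ b1 = b2) := by
        rintro ⟨rfl, rfl⟩; exact h2 h1
      cases r1 with
      | nil => simp; intro ha hb; exact hne2 ⟨ha, hb⟩
      | cons x1 t1 => simp; intro ha hb; exact hne2 ⟨ha, hb⟩
  · simp only [pvOrgKey_cons, h1]
    rw [if_neg (by simp), if_neg (by simp)]
    by_cases h2 : ((a2 == "io" || a2 == "com") && pvHostingA.contains b2) = true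
    · have hne2 : ¬ (a1 = a2 ∧ b1 = b2) := by
        rintro ⟨rfl, rfl⟩; exact h1 h2
      rw [if_pos h2]
      cases r2 with
      | nil => simp; intro ha hb; exact hne2 ⟨ha, hb⟩
      | cons x2 t2 => simp; intro ha hb; exact hne2 ⟨ha, hb⟩
    · rw [if_neg h2]; simp

-- ===== VERDICT (by name: the statement is the Claim_ definition above) =====
theorem same_organization_spec : Claim_equal_same_organization := by
  intro g1 g2 _
  unfold Spec_same_organization same_organization same_organization_alt
  by_cases h : g1 = g2
  · simp [h]
  · simp only [beq_iff_eq, h, if_false]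
    cases hp1 : (PySem.Str.split? g1 ".").getD [] with
    | nil => simp
    | cons a1 t1 =>
      cases t1 with
      | nil => simp
      | cons b1 r1 =>
        cases hp2 : (PySem.Str.split? g2 ".").getD [] with
        | nil => simp
        | cons a2 t2 =>
          cases t2 with
          | nil => simp
          | cons b2 r2 =>
            have hlen : ¬ (min (a1 :: b1 :: r1).length (a2 :: b2 :: r2).length < 2) := by
              simp [Nat.min_def]; split <;> omega
            rw [if_neg hlen, if_neg (by simp)]
            exact pv_core g1 g2 h a1 b1 a2 b2 r1 r2
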